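-- pv_equiv track=rewrite | github.com/Thomas-Carlsen/AdventOfCode | adventOfCode/adventOfCode17/adventofcode3.py | findLayerAndLayerHeight
-- ===== SOURCE A (Python) =====
-- def findLayerAndLayerHeight(number):
-- 	layer = 0
-- 	index = 0
-- 	if number == 1:
-- 		layer = 1
-- 		index = 1
-- 	elif number in [2,3,4,5,6,7,8,9]:
-- 		layer = 2
-- 		index = [2,3,4,5,6,7,8,9].index(number)
-- 	else:
-- 		startInterval = 9+1
-- 		endInterval = 25+1
-- 		count = 3
-- 		while layer == 0:
-- 			test = [num for num in range(startInterval, endInterval)]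
-- 			if number in test:
-- 				layer = count
-- 				index = test.index(number)
-- 			count += 1
-- 			startInterval = endInterval
-- 			endInterval = endInterval + (endInterval - 4) + 12
--
-- 	height = 1 + 2 * (layer-1)
--
-- 	return layer, height, index
-- ===== SOURCE B (Python) =====
-- def findLayerAndLayerHeight(number):
--     if number == 1:
--         return 1, 1, 1
--     if number <= 9:
--         return 2, 3, number - 2
--     t = ((number + 8) // 34).bit_length()
--     layer = t + 3
--     start = 10 if t == 0 else 34 * (1 << (t - 1)) - 8
--     return layer, 2 * layer - 1, number - start
-- ===== Notes on version B (the rewrite author's own statement) =====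
-- stated objective: faster
-- what changed: A scans ever-growing materialised ranges (linear work in the number) to find the spiral layer; B computes the layer index in closed form from the doubling ring boundaries 34*2^t-8 via floor division and bit_length, no lists and no scanning.
import Mathlib
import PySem

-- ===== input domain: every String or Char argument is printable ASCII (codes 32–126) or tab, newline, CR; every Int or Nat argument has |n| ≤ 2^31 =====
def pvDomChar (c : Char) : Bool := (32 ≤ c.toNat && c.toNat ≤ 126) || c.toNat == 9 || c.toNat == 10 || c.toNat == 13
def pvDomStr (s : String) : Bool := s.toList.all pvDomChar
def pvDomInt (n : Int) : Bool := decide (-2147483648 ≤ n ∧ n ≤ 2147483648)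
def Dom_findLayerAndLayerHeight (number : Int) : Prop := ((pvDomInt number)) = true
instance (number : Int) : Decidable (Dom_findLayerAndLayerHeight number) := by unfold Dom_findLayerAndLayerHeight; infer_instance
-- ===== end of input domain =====

-- B replaces A's linear scan of materialised ranges by a closed-form bit_length computation of the ring; objective: faster (asymptotic).

-- ===== PORT A =====
-- the while loop, as fuel recursion (fuel only makes the loop total in Lean; Pre_ guarantees enough fuel)
def aLoop (number : Int) (startI endI count : Int) : Nat → Int × Int
  | 0 => (0, 0)
  | fuel + 1 =>
    let test := PySem.List.pyRange startI endI 1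
    if number ∈ test then
      (count, (((PySem.List.index? test number).getD 0 : Nat) : Int))
    else
      aLoop number endI (endI + (endI - 4) + 12) (count + 1) fuel

def findLayerAndLayerHeight (number : Int) : List Int :=
  let (layer, index) :=
    if number = 1 then ((1 : Int), (1 : Int))
    else if number ∈ ([2, 3, 4, 5, 6, 7, 8, 9] : List Int) then
      ((2 : Int), (((PySem.List.index? ([2, 3, 4, 5, 6, 7, 8, 9] : List Int) number).getD 0 : Nat) : Int))
    else
      aLoop number (9 + 1) (25 + 1) 3 (number.toNat + 1)
  let height := 1 + 2 * (layer - 1)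
  [layer, height, index]

-- ===== PORT B =====
def findLayerAndLayerHeight_alt (number : Int) : List Int :=
  if number = 1 then [1, 1, 1]
  else if number ≤ 9 then [2, 3, number - 2]
  else
    let t : Nat := PySem.Int.bitLength (PySem.Int.floordiv (number + 8) 34)
    let layer : Int := (t : Int) + 3
    let start : Int := if t = 0 then 10 else 34 * ((2 ^ (t - 1) : Nat) : Int) - 8
    [layer, 2 * layer - 1, number - start]

-- ===== PRECONDITION & SPEC =====
-- A's while loop never terminates for number ≤ 0 (the intervals only grow upward), so A returns exactly on number ≥ 1.
def Pre_findLayerAndLayerHeight (number : Int) : Prop := 1 ≤ number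
instance (number : Int) : Decidable (Pre_findLayerAndLayerHeight number) := by unfold Pre_findLayerAndLayerHeight; infer_instance
def pvWitness_findLayerAndLayerHeight : Int := 11

def Spec_findLayerAndLayerHeight (number : Int) (out : List Int) : Prop := out = findLayerAndLayerHeight_alt number
instance (number : Int) (out : List Int) : Decidable (Spec_findLayerAndLayerHeight number out) := by unfold Spec_findLayerAndLayerHeight; infer_instance

-- ===== CLAIM (what is proved, stated in full; the proofs are below) =====
def Claim_equal_findLayerAndLayerHeight : Prop := ∀ (number : Int), Dom_findLayerAndLayerHeight number → Pre_findLayerAndLayerHeight number → Spec_findLayerAndLayerHeight number (findLayerAndLayerHeight number)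

-- ===== LEMMAS AND PROOFS =====

-- end boundary of ring t (ring t holds numbers [ringStart t, ringEnd t))
def ringEnd (t : Nat) : Int := 34 * (2 : Int) ^ t - 8
def ringStart : Nat → Int
  | 0 => 10
  | t + 1 => ringEnd t

lemma ringEnd_mono {t u : Nat} (h : t ≤ u) : ringEnd t ≤ ringEnd u := by
  unfold ringEnd
  have : (2 : Int) ^ t ≤ 2 ^ u := pow_le_pow_right₀ (by norm_num) h
  omega

lemma index_pyRange (a b x : Int) (h1 : a ≤ x) (h2 : x < b) :
    PySem.List.index? (PySem.List.pyRange a b 1) x = some (x - a).toNat := by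
  generalize hd : (x - a).toNat = n
  induction n generalizing a with
  | zero =>
    have hxa : x = a := by omega
    rw [PySem.List.pyRange_one_cons (by omega), hxa, PySem.List.index?_cons_self]
  | succ n ih =>
    have hax : a < x := by omega
    rw [PySem.List.pyRange_one_cons (by omega),
        PySem.List.index?_cons_of_ne _ (show a ≠ x by omega),
        ih (a + 1) (by omega) (by omega)]
    simp

lemma aLoop_eq (number : Int) :
    ∀ (d t fuel : Nat), d + 1 ≤ fuel →
      ringStart t ≤ number → number < ringEnd (t + d) →
      (d = 0 ∨ ringEnd (t + d - 1) ≤ number) →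
      aLoop number (ringStart t) (ringEnd t) ((t : Int) + 3) fuel
        = (((t + d : Nat) : Int) + 3, number - ringStart (t + d)) := by
  intro d
  induction d with
  | zero =>
    intro t fuel hf h1 h2 _
    match fuel, hf with
    | f + 1, _ =>
      unfold aLoop
      have hmem : number ∈ PySem.List.pyRange (ringStart t) (ringEnd t) 1 := by
        rw [PySem.List.mem_pyRange_one]; constructor <;> omega
      rw [if_pos hmem, index_pyRange _ _ _ h1 (by omega)]
      simp only [Option.getD_some, Nat.add_zero]
      have hc : ((number - ringStart t).toNat : Int) = number - ringStart t := by omega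
      rw [hc]
  | succ d ih =>
    intro t fuel hf h1 h2 hside
    have hEt : ringEnd (t + d) ≤ number := by
      rcases hside with h | h
      · omega
      · simpa using h
    have hEtle : ringEnd t ≤ number := le_trans (ringEnd_mono (by omega)) hEt
    match fuel, hf with
    | f + 1, hf =>
      unfold aLoop
      have hmem : number ∉ PySem.List.pyRange (ringStart t) (ringEnd t) 1 := by
        rw [PySem.List.mem_pyRange_one]; omega
      rw [if_neg hmem]
      have hnext : ringEnd t + (ringEnd t - 4) + 12 = ringEnd (t + 1) := by
        unfold ringEnd
        have : (2 : Int) ^ (t + 1) = 2 * 2 ^ t := by ring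
        omega
      have hcnt : ((t : Int) + 3) + 1 = ((t + 1 : Nat) : Int) + 3 := by push_cast; ring
      rw [hnext, hcnt]
      have hstart : ringEnd t = ringStart (t + 1) := rfl
      rw [hstart]
      have := ih (t + 1) f (by omega) (by rw [← hstart]; exact hEtle)
        (by have : t + 1 + d = t + (d + 1) := by omega
            rw [this]; exact h2)
        (by rcases Nat.eq_zero_or_pos d with hd | hd
            · left; exact hd
            · right
              have h1' : t + 1 + d - 1 = t + d := by omega
              rw [h1']
              exact hEt)
      rw [this]
      have h3 : t + 1 + d = t + (d + 1) := by omega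
      rw [h3]

-- ===== VERDICT =====
theorem findLayerAndLayerHeight_spec : Claim_equal_findLayerAndLayerHeight := by
  intro number _ hpre
  unfold Pre_findLayerAndLayerHeight at hpre
  unfold Spec_findLayerAndLayerHeight
  by_cases h9 : number ≤ 9
  · -- 1 ≤ number ≤ 9: finitely many cases
    interval_cases number <;> decide
  · -- number ≥ 10: the loop
    have h10 : 10 ≤ number := by omega
    -- the quotient q = (number + 8) // 34
    have hq : PySem.Int.floordiv (number + 8) 34 = (number + 8) / 34 :=
      PySem.Int.floordiv_eq_ediv_of_pos (by norm_num)
    have hq1 : 34 * PySem.Int.floordiv (number + 8) 34 ≤ number + 8 ∧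
        number + 8 < 34 * PySem.Int.floordiv (number + 8) 34 + 34 := by
      rw [hq]
      have hdm := Int.mul_ediv_add_emod (number + 8) 34
      have hlt := Int.emod_lt_of_pos (number + 8) (by norm_num : (0:Int) < 34)
      have hge := Int.emod_nonneg (number + 8) (by norm_num : (34:Int) ≠ 0)
      constructor <;> omega
    set q : Int := PySem.Int.floordiv (number + 8) 34 with hqdef
    have hq0 : 0 ≤ q := by omega
    set d : Nat := PySem.Int.bitLength q with hddef
    -- powers of two as Int atoms
    have hEd : ringEnd d = 34 * ((2 ^ d : Nat) : Int) - 8 := by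
      unfold ringEnd; push_cast; ring
    have hlt2 : q < ((2 ^ d : Nat) : Int) := by
      have h1 := PySem.Int.lt_two_pow_bitLength q
      have h2 : (q.natAbs : Int) < ((2 ^ d : Nat) : Int) := by exact_mod_cast h1
      omega
    have hnum_lt : number < ringEnd d := by rw [hEd]; omega
    have hlow : d = 0 ∨ ringEnd (d - 1) ≤ number := by
      rcases Nat.eq_zero_or_pos d with hd | hd
      · exact Or.inl hd
      · right
        have hqne : q ≠ 0 := by
          intro h0
          rw [hddef, h0, PySem.Int.bitLength_zero] at hd
          omega
        have h1 := PySem.Int.two_pow_bitLength_le q hqne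
        have h2 : ((2 ^ (d - 1) : Nat) : Int) ≤ (q.natAbs : Int) := by exact_mod_cast h1
        have hE1 : ringEnd (d - 1) = 34 * ((2 ^ (d - 1) : Nat) : Int) - 8 := by
          unfold ringEnd; push_cast; ring
        rw [hE1]; omega
    have hfuel : d + 1 ≤ number.toNat + 1 := by
      rcases hlow with hd | hle
      · omega
      · rcases Nat.eq_zero_or_pos d with hd | hd
        · omega
        · have hdle : d ≤ 2 ^ (d - 1) := by
            have := Nat.lt_two_pow_self (n := d - 1); omega
          have hdle' : (d : Int) ≤ ((2 ^ (d - 1) : Nat) : Int) := by exact_mod_cast hdle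
          have hE1 : ringEnd (d - 1) = 34 * ((2 ^ (d - 1) : Nat) : Int) - 8 := by
            unfold ringEnd; push_cast; ring
          rw [hE1] at hle
          omega
    have hloop := aLoop_eq number d 0 (number.toNat + 1) hfuel
      (by unfold ringStart; omega)
      (by simpa using hnum_lt)
      (by simpa using hlow)
    simp only [Nat.cast_zero, zero_add,
      show ringStart 0 = (10 : Int) from rfl,
      show ringEnd 0 = (26 : Int) from by unfold ringEnd; norm_num] at hloop
    -- compute B's value
    have hstart : (if d = 0 then (10 : Int) else 34 * ((2 ^ (d - 1) : Nat) : Int) - 8)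
        = ringStart d := by
      cases d with
      | zero => rfl
      | succ n =>
        simp only [Nat.succ_ne_zero, if_false]
        show 34 * ((2 ^ n : Nat) : Int) - 8 = ringEnd n
        unfold ringEnd; push_cast; ring
    have hB : findLayerAndLayerHeight_alt number
        = [(d : Int) + 3, 2 * ((d : Int) + 3) - 1, number - ringStart d] := by
      unfold findLayerAndLayerHeight_alt
      rw [if_neg (by omega : ¬ number = 1), if_neg (by omega : ¬ number ≤ 9)]
      simp only [← hqdef, ← hddef, hstart]
    -- compute A's value
    have hA : findLayerAndLayerHeight number
        = [(d : Int) + 3, 1 + 2 * (((d : Int) + 3) - 1), number - ringStart d] := by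
      unfold findLayerAndLayerHeight
      rw [if_neg (by omega : ¬ number = 1),
          if_neg (by
            intro h
            simp only [List.mem_cons, List.not_mem_nil] at h
            rcases h with h|h|h|h|h|h|h|h|h <;> simp_all :
            ¬ number ∈ ([2, 3, 4, 5, 6, 7, 8, 9] : List Int))]
      simp only [show (9 : Int) + 1 = 10 from by norm_num,
        show (25 : Int) + 1 = 26 from by norm_num, hloop]
    rw [hA, hB]
    have : 1 + 2 * (((d : Int) + 3) - 1) = 2 * ((d : Int) + 3) - 1 := by ring
    rw [this]
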